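-- pv_equiv track=rewrite | github.com/VarunyThePruney/AI-Assigment2 | uninformedsearch/cannibals.py | dfs
-- ===== SOURCE A (Python) =====
-- TOTAL_M = 3
--
-- TOTAL_C = 3
--
-- def is_valid(state):
--     M_left, C_left, _ = state
--     M_right = TOTAL_M - M_left
--     C_right = TOTAL_C - C_left
--
--     if not (0 <= M_left <= TOTAL_M and 0 <= C_left <= TOTAL_C):
--         return False
--
--     if M_left > 0 and M_left < C_left:
--         return False
--     if M_right > 0 and M_right < C_right:
--         return False
--
--     return True
--
-- def get_successors(state):
--     M_left, C_left, boat = state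
--     successors = []
--
--     moves = [(1,0), (2,0), (0,1), (0,2), (1,1)]
--
--     for m, c in moves:
--         if boat == 0:  # left -> right
--             new_state = (M_left - m, C_left - c, 1)
--         else:          # right -> left
--             new_state = (M_left + m, C_left + c, 0)
--
--         if is_valid(new_state):
--             successors.append(new_state)
--
--     return successors
--
-- def dfs(start, goal):
--     stack = [(start, [start])]
--     visited = set()
--
--     while stack:
--         state, path = stack.pop()
--
--         if state == goal:
--             return path
--
--         if state in visited:
--             continue
--
--         visited.add(state)
--
--         for succ in get_successors(state):
--             stack.append((succ, path + [succ]))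
--
--     return None
-- ===== SOURCE B (Python) =====
-- TOTAL_M = 3
--
-- TOTAL_C = 3
--
-- def is_valid(state):
--     M_left, C_left, _ = state
--     M_right = TOTAL_M - M_left
--     C_right = TOTAL_C - C_left
--
--     if not (0 <= M_left <= TOTAL_M and 0 <= C_left <= TOTAL_C):
--         return False
--
--     if M_left > 0 and M_left < C_left:
--         return False
--     if M_right > 0 and M_right < C_right:
--         return False
--
--     return True
--
-- def get_successors(state):
--     M_left, C_left, boat = state
--     successors = []
--
--     moves = [(1,0), (2,0), (0,1), (0,2), (1,1)]
--
--     for m, c in moves: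
--         if boat == 0:  # left -> right
--             new_state = (M_left - m, C_left - c, 1)
--         else:          # right -> left
--             new_state = (M_left + m, C_left + c, 0)
--
--         if is_valid(new_state):
--             successors.append(new_state)
--
--     return successors
--
-- def dfs(start, goal):
--     visited = set()
--
--     def rec(state, path):
--         if state == goal:
--             return path
--         if state in visited:
--             return None
--         visited.add(state)
--         for succ in reversed(get_successors(state)):
--             result = rec(succ, path + [succ])
--             if result is not None:
--                 return result
--         return None
--
--     return rec(start, [start])
-- ===== Notes on version B (the rewrite author's own statement) =====
-- stated objective: alternative
-- what changed: Replaces A's explicit stack-and-while-loop DFS by a recursive DFS helper over the state graph (recursing on the reversed successor list with a shared visited set), returning the first non-None result.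
import Mathlib
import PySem

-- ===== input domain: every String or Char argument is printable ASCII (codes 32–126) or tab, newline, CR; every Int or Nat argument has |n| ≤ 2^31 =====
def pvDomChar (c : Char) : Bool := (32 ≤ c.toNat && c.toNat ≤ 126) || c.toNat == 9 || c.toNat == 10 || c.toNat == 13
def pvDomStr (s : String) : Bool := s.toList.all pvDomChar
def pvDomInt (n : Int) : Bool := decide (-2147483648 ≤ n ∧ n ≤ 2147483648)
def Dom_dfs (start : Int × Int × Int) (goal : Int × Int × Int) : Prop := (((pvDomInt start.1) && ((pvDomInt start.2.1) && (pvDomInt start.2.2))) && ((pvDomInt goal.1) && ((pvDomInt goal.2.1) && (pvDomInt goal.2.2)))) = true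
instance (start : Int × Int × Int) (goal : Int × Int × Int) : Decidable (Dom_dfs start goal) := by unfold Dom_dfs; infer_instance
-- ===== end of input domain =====

-- B replaces A's explicit stack-and-loop DFS by a recursive DFS over the state graph
-- (recursion on the reversed successor list with a threaded visited set); same return value, different decomposition.

-- ===== PORT A =====

def isValid (state : Int × Int × Int) : Bool :=
  let M := state.1
  let C := state.2.1
  let MR := 3 - M
  let CR := 3 - C
  if ¬ (0 ≤ M ∧ M ≤ 3 ∧ 0 ≤ C ∧ C ≤ 3) then false
  else if M > 0 ∧ M < C then false
  else if MR > 0 ∧ MR < CR then false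
  else true

def moveStep (state : Int × Int × Int) (mv : Int × Int) : Int × Int × Int :=
  if state.2.2 = 0 then (state.1 - mv.1, state.2.1 - mv.2, 1)
  else (state.1 + mv.1, state.2.1 + mv.2, 0)

def getSuccessors (state : Int × Int × Int) : List (Int × Int × Int) :=
  [((1:Int),(0:Int)), (2,0), (0,1), (0,2), (1,1)].foldl
    (fun acc mv => if isValid (moveStep state mv) then acc ++ [moveStep state mv] else acc) []

-- A's while loop, fueled (`none` = fuel exhausted; fuel 1000 is proved sufficient below).
def dfsLoop (goal : Int × Int × Int) :
    Nat → List ((Int × Int × Int) × List (Int × Int × Int)) → PySem.Set (Int × Int × Int) →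
    Option (Option (List (Int × Int × Int)))
  | _, [], _ => some none
  | 0, _ :: _, _ => none
  | n+1, f :: fs, vis =>
    match (f :: fs).getLast? with
    | none => none  -- unreachable: a cons always has a last element
    | some frame =>
      let rest := (f :: fs).dropLast
      if frame.1 = goal then some (some frame.2)
      else if PySem.Set.contains vis frame.1 then dfsLoop goal n rest vis
      else dfsLoop goal n
        (rest ++ (getSuccessors frame.1).map (fun t => (t, frame.2 ++ [t])))
        (PySem.Set.add vis frame.1)

def dfs (start : Int × Int × Int) (goal : Int × Int × Int) : Option (List (Int × Int × Int)) :=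
  match dfsLoop goal 1000 [(start, [start])] PySem.Set.empty with
  | some r => r
  | none => none

-- ===== PORT B =====

-- Source B's `rec`, fueled (`none` = fuel exhausted), with the mutated `visited` set threaded through.
mutual
def recB (goal : Int × Int × Int) :
    Nat → (Int × Int × Int) → List (Int × Int × Int) → PySem.Set (Int × Int × Int) →
    Option (Option (List (Int × Int × Int)) × PySem.Set (Int × Int × Int))
  | 0, _, _, _ => none
  | n+1, s, p, vis =>
    if s = goal then some (some p, vis)
    else if PySem.Set.contains vis s then some (none, vis)
    else recChildren goal n ((getSuccessors s).reverse.map (fun t => (t, p ++ [t])))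
      (PySem.Set.add vis s)
  termination_by n _ _ _ => (n, 0)

def recChildren (goal : Int × Int × Int) :
    Nat → List ((Int × Int × Int) × List (Int × Int × Int)) → PySem.Set (Int × Int × Int) →
    Option (Option (List (Int × Int × Int)) × PySem.Set (Int × Int × Int))
  | _, [], vis => some (none, vis)
  | n, (s, p) :: rest, vis =>
    match recB goal n s p vis with
    | none => none
    | some (some r, v) => some (some r, v)
    | some (none, v) => recChildren goal n rest v
  termination_by n l _ => (n, l.length + 1)
end

def dfs_alt (start : Int × Int × Int) (goal : Int × Int × Int) : Option (List (Int × Int × Int)) :=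
  match recB goal 2000 start [start] PySem.Set.empty with
  | some (r, _) => r
  | none => none

-- ===== PRECONDITION & SPEC =====
def Spec_dfs (start : Int × Int × Int) (goal : Int × Int × Int) (out : Option (List (Int × Int × Int))) : Prop := out = dfs_alt start goal
instance (start : Int × Int × Int) (goal : Int × Int × Int) (out : Option (List (Int × Int × Int))) : Decidable (Spec_dfs start goal out) := by unfold Spec_dfs; infer_instance

-- ===== CLAIM (what is proved, stated in full; the proofs are below) =====
def Claim_equal_dfs : Prop := ∀ (start : Int × Int × Int) (goal : Int × Int × Int), Dom_dfs start goal → Spec_dfs start goal (dfs start goal)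

-- ===== LEMMAS AND PROOFS =====

-- the 20 states a successor can be (every successor is valid and has boat 0 or 1)
def validStates : List (Int × Int × Int) :=
  [(0,0,0),(0,1,0),(0,2,0),(0,3,0),(1,1,0),(2,2,0),(3,0,0),(3,1,0),(3,2,0),(3,3,0),
   (0,0,1),(0,1,1),(0,2,1),(0,3,1),(1,1,1),(2,2,1),(3,0,1),(3,1,1),(3,2,1),(3,3,1)]

lemma valid_mem_validStates (t : Int × Int × Int) (hv : isValid t = true)
    (hb : t.2.2 = 0 ∨ t.2.2 = 1) : t ∈ validStates := by
  obtain ⟨a, b, c⟩ := t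
  have hb' : c = 0 ∨ c = 1 := hb
  simp only [isValid] at hv
  split_ifs at hv with h1 h2 h3
  obtain ⟨ha0, ha3, hb0, hb3⟩ := h1
  rcases hb' with rfl | rfl <;>
    · interval_cases a <;> interval_cases b <;> first | decide | omega

lemma mem_getSuccessors (s t : Int × Int × Int) (h : t ∈ getSuccessors s) :
    t ∈ validStates := by
  have key : ∀ (ms : List (Int × Int)) (acc : List (Int × Int × Int)),
      t ∈ ms.foldl (fun acc mv => if isValid (moveStep s mv) then acc ++ [moveStep s mv] else acc) acc →
      t ∈ acc ∨ (isValid t = true ∧ ∃ mv, t = moveStep s mv) := by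
    intro ms
    induction ms with
    | nil => intro acc h; exact Or.inl h
    | cons mv ms ih =>
      intro acc h
      rcases ih _ h with hin | hgood
      · dsimp only at hin
        split_ifs at hin with hval
        · rcases List.mem_append.mp hin with h' | h'
          · exact Or.inl h'
          · simp at h'
            subst h'
            exact Or.inr ⟨hval, mv, rfl⟩
        · exact Or.inl hin
      · exact Or.inr hgood
  rcases key _ _ h with hin | ⟨hval, mv, rfl⟩
  · simp at hin
  · apply valid_mem_validStates _ hval
    simp only [moveStep]
    split_ifs <;> simp

lemma length_getSuccessors (s : Int × Int × Int) : (getSuccessors s).length ≤ 5 := by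
  have key : ∀ (ms : List (Int × Int)) (acc : List (Int × Int × Int)),
      (ms.foldl (fun acc mv => if isValid (moveStep s mv) then acc ++ [moveStep s mv] else acc) acc).length
        ≤ acc.length + ms.length := by
    intro ms
    induction ms with
    | nil => intro acc; simp
    | cons mv ms ih =>
      intro acc
      refine le_trans (ih _) ?_
      dsimp only
      split_ifs <;> simp <;> omega
  simpa using key _ []

-- popping the last frame: one unfolding step of A's loop
lemma dfsLoop_concat (goal : Int × Int × Int) (n : Nat)
    (rest : List ((Int × Int × Int) × List (Int × Int × Int))) (s : Int × Int × Int)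
    (p : List (Int × Int × Int)) (vis : PySem.Set (Int × Int × Int)) :
    dfsLoop goal (n+1) (rest ++ [(s, p)]) vis =
      if s = goal then some (some p)
      else if PySem.Set.contains vis s then dfsLoop goal n rest vis
      else dfsLoop goal n
        (rest ++ (getSuccessors s).map (fun t => (t, p ++ [t])))
        (PySem.Set.add vis s) := by
  rcases rest with _ | ⟨f, fs⟩
  · simp [dfsLoop]
  · have h1 : (f :: (fs ++ [(s, p)])).getLast? = some (s, p) := by
      rw [show f :: (fs ++ [(s, p)]) = (f :: fs) ++ [(s, p)] from rfl,
        List.getLast?_append_cons]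
      rfl
    have h2 : (f :: (fs ++ [(s, p)])).dropLast = f :: fs := by
      rw [show f :: (fs ++ [(s, p)]) = (f :: fs) ++ [(s, p)] from rfl,
        List.dropLast_concat]
    simp only [List.cons_append, dfsLoop, h1, h2]

-- the visited-set count over a finite universe strictly drops when a fresh element is added
lemma filter_add_lt (U : List (Int × Int × Int)) (vis : PySem.Set (Int × Int × Int))
    (s : Int × Int × Int) (hsU : s ∈ U) (hs : PySem.Set.contains vis s = false) :
    (U.filter (fun u => !PySem.Set.contains (PySem.Set.add vis s) u)).length <
      (U.filter (fun u => !PySem.Set.contains vis u)).length := by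
  have hsv : s ∉ vis := by simpa using hs
  have hcon : ∀ u, PySem.Set.contains (PySem.Set.add vis s) u =
      (PySem.Set.contains vis u || decide (u = s)) := by
    intro u
    by_cases h1 : u ∈ vis <;> by_cases h2 : u = s <;>
      simp [PySem.Set.mem_add, h1, h2]
  have heq : U.filter (fun u => !PySem.Set.contains (PySem.Set.add vis s) u) =
      (U.filter (fun u => !PySem.Set.contains vis u)).filter (fun u => !decide (u = s)) := by
    rw [List.filter_filter]
    apply List.filter_congr
    intro u _
    rw [hcon u]
    cases hb : PySem.Set.contains vis u <;> simp
  rw [heq]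
  apply List.length_filter_lt_length_iff_exists.mpr
  exact ⟨s, List.mem_filter.mpr ⟨hsU, by simpa using hsv⟩, by simp⟩

-- A's loop cannot run out of fuel: every frame's state lies in a finite universe U
lemma dfsLoop_complete (goal : Int × Int × Int) (U : List (Int × Int × Int))
    (hU : ∀ s t, t ∈ getSuccessors s → t ∈ U) :
    ∀ (n : Nat) (stack : List ((Int × Int × Int) × List (Int × Int × Int)))
      (vis : PySem.Set (Int × Int × Int)),
      (∀ f ∈ stack, f.1 ∈ U) →
      stack.length + 5 * (U.filter (fun u => !PySem.Set.contains vis u)).length ≤ n →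
      dfsLoop goal n stack vis ≠ none := by
  intro n
  induction n with
  | zero =>
    intro stack vis _ hlen
    rcases stack with _ | ⟨f, fs⟩
    · simp [dfsLoop]
    · simp at hlen
  | succ n ih =>
    intro stack vis hmem hlen
    rcases List.eq_nil_or_concat stack with rfl | ⟨rest, ⟨s, p⟩, rfl⟩
    · simp [dfsLoop]
    rw [List.concat_eq_append] at hmem hlen ⊢
    rw [dfsLoop_concat]
    have hsU : s ∈ U := by
      have := hmem (s, p) (by simp)
      simpa using this
    have hrest : ∀ f ∈ rest, f.1 ∈ U := fun f hf => hmem f (by simp [hf])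
    split_ifs with hg hv
    · simp
    · apply ih _ _ hrest
      simp at hlen ⊢
      omega
    · apply ih
      · intro f hf
        rcases List.mem_append.mp hf with h' | h'
        · exact hrest f h'
        · rcases List.mem_map.mp h' with ⟨t, ht, rfl⟩
          exact hU s t ht
      · have hdrop := filter_add_lt U vis s hsU (by simpa using hv)
        have hsucc := length_getSuccessors s
        simp at hdrop hlen ⊢
        omega

-- fuel monotonicity for B's recursion
lemma recB_mono (goal : Int × Int × Int) :
    ∀ (n : Nat),
      (∀ s p vis x, recB goal n s p vis = some x → recB goal (n+1) s p vis = some x) ∧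
      (∀ l vis x, recChildren goal n l vis = some x → recChildren goal (n+1) l vis = some x) := by
  intro n
  induction n with
  | zero =>
    constructor
    · intro s p vis x h; simp [recB] at h
    · intro l vis x h
      rcases l with _ | ⟨⟨s, p⟩, rest⟩
      · simpa [recChildren] using h
      · simp [recChildren, recB] at h
  | succ n ih =>
    have hB : ∀ s p vis x, recB goal (n+1) s p vis = some x → recB goal (n+2) s p vis = some x := by
      intro s p vis x h
      simp only [recB] at h ⊢
      split_ifs at h ⊢ with h1 h2
      · exact h
      · exact h
      · exact ih.2 _ _ _ h
    constructor
    · exact hB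
    · intro l vis x h
      induction l generalizing vis x with
      | nil => simpa [recChildren] using h
      | cons f rest ihl =>
        obtain ⟨s, p⟩ := f
        simp only [recChildren] at h ⊢
        rcases hr : recB goal (n+1) s p vis with _ | ⟨r, v⟩
        · rw [hr] at h; cases h
        · rw [hr] at h
          rw [hB _ _ _ _ hr]
          rcases r with _ | r
          · exact ihl _ _ h
          · exact h

lemma recB_mono_le (goal : Int × Int × Int) {n m : Nat} (h : n ≤ m) :
    ∀ s p vis x, recB goal n s p vis = some x → recB goal m s p vis = some x := by
  obtain ⟨k, rfl⟩ := Nat.exists_eq_add_of_le h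
  intro s p vis x hx
  induction k with
  | zero => exact hx
  | succ k ih => exact (recB_mono goal (n + k)).1 _ _ _ _ (ih (by omega))

lemma recChildren_append (goal : Int × Int × Int) (n : Nat)
    (l1 l2 : List ((Int × Int × Int) × List (Int × Int × Int)))
    (vis : PySem.Set (Int × Int × Int)) :
    recChildren goal n (l1 ++ l2) vis =
      match recChildren goal n l1 vis with
      | none => none
      | some (some r, v) => some (some r, v)
      | some (none, v) => recChildren goal n l2 v := by
  induction l1 generalizing vis with
  | nil => simp [recChildren]
  | cons f rest ih =>
    obtain ⟨s, p⟩ := f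
    simp only [List.cons_append, recChildren]
    rcases recB goal n s p vis with _ | ⟨_ | r, v⟩ <;> simp [ih]

-- the stack loop is simulated by the recursion on the reversed stack
lemma sim (goal : Int × Int × Int) :
    ∀ (n : Nat) (stack : List ((Int × Int × Int) × List (Int × Int × Int)))
      (vis : PySem.Set (Int × Int × Int)) (r : Option (List (Int × Int × Int))),
      dfsLoop goal n stack vis = some r →
      ∃ v, recChildren goal (n+1) stack.reverse vis = some (r, v) := by
  intro n
  induction n with
  | zero =>
    intro stack vis r h
    rcases stack with _ | ⟨f, fs⟩
    · simp [dfsLoop] at h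
      subst h
      exact ⟨vis, by simp [recChildren]⟩
    · simp [dfsLoop] at h
  | succ n ih =>
    intro stack vis r h
    rcases List.eq_nil_or_concat stack with rfl | ⟨rest, ⟨s, p⟩, rfl⟩
    · simp [dfsLoop] at h
      subst h
      exact ⟨vis, by simp [recChildren]⟩
    rw [List.concat_eq_append] at h ⊢
    rw [dfsLoop_concat] at h
    have hrev : (rest ++ [(s, p)]).reverse = (s, p) :: rest.reverse := by simp
    rw [hrev]
    split_ifs at h with hg hv
    · -- goal hit on pop
      injection h with h; subst h
      refine ⟨vis, ?_⟩
      simp only [recChildren, recB]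
      rw [if_pos hg]
    · -- already visited: skip
      obtain ⟨v, hrec⟩ := ih _ _ _ h
      refine ⟨v, ?_⟩
      simp only [recChildren, recB]
      rw [if_neg hg, if_pos hv]
      exact (recB_mono goal (n+1)).2 _ _ _ hrec
    · -- fresh state: expand children
      obtain ⟨v, hrec⟩ := ih _ _ _ h
      rw [List.reverse_append] at hrec
      rw [recChildren_append] at hrec
      have hmap : ((getSuccessors s).map (fun t => (t, p ++ [t]))).reverse =
          (getSuccessors s).reverse.map (fun t => (t, p ++ [t])) := by
        simp
      rcases hc : recChildren goal (n+1) ((getSuccessors s).map (fun t => (t, p ++ [t]))).reverse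
          (PySem.Set.add vis s) with _ | ⟨r1, v1⟩
      · rw [hc] at hrec; cases hrec
      rw [hc] at hrec
      have hrecB : recB goal (n+2) s p vis = some (r1, v1) := by
        simp only [recB]
        rw [if_neg hg, if_neg hv, ← hmap]
        exact hc
      rcases r1 with _ | r1
      · -- children found nothing; continue with the rest at v1
        refine ⟨v, ?_⟩
        simp only [recChildren]
        rw [hrecB]
        exact (recB_mono goal (n+1)).2 _ _ _ hrec
      · -- children found the answer
        simp only at hrec
        injection hrec with hrec
        injection hrec with h1 h2
        subst h1; subst h2
        refine ⟨v1, ?_⟩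
        simp only [recChildren]
        rw [hrecB]

-- ===== VERDICT (by name: the statement is the Claim_ definition above) =====
theorem dfs_spec : Claim_equal_dfs := by
  intro start goal _
  unfold Spec_dfs
  -- A's loop terminates within fuel 1000
  have hU : ∀ s t, t ∈ getSuccessors s → t ∈ (start :: validStates) :=
    fun s t ht => List.mem_cons_of_mem _ (mem_getSuccessors s t ht)
  have hcomp := dfsLoop_complete goal (start :: validStates) hU 1000
      [(start, [start])] PySem.Set.empty (by simp) (by
        have hle := List.length_filter_le
          (fun u => !PySem.Set.contains PySem.Set.empty u) (start :: validStates)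
        simp [validStates] at hle ⊢
        try omega)
  rcases hA : dfsLoop goal 1000 [(start, [start])] PySem.Set.empty with _ | r
  · exact absurd hA hcomp
  obtain ⟨v, hrec⟩ := sim goal 1000 _ _ _ hA
  simp only [List.reverse_singleton, recChildren] at hrec
  rcases hB : recB goal 1001 start [start] PySem.Set.empty with _ | ⟨r1, v1⟩
  · rw [hB] at hrec
    simp at hrec
  rw [hB] at hrec
  have hB2 : recB goal 2000 start [start] PySem.Set.empty = some (r1, v1) :=
    recB_mono_le goal (by omega) _ _ _ _ hB
  rcases r1 with _ | r1
  · simp only [recChildren] at hrec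
    injection hrec with hrec
    injection hrec with h1 _
    subst h1
    unfold dfs dfs_alt
    rw [hA, hB2]
  · simp only at hrec
    injection hrec with hrec
    injection hrec with h1 _
    subst h1
    unfold dfs dfs_alt
    rw [hA, hB2]
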